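-- pv_equiv track=rewrite | github.com/ArshiaRx/Computer-Science-I | labs109.py | remove_after_kth
-- ===== SOURCE A (Python) =====
-- def remove_after_kth(items, k=1):
--
--
--     finalized_items = []      #define a variable to be returned as a list
--     same_items = list(set(items))        #list the same values of items
--
--     #multiply the length of same items to get the list lenght
--     number_of_items = [0]*len(same_items)
--
--     for i in range(len(items)):
--         #for every element in range of length of items do the following:
--             #define a variable to add the items element in the same list items
--         index = same_items.index((items[i]))
--
--         #increment number of items each time new index adds up
--         #number_of_items[index] += 1
--         number_of_items[index] = number_of_items[index] + 1
--
--         if number_of_items[index] <= k: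
--             #if number of items at each index is less than k fo the following:
--                 #add the items element to the finalized items list
--             finalized_items = finalized_items + [items[i]]
--
--     return finalized_items  #return the list
-- ===== SOURCE B (Python) =====
-- def remove_after_kth(items, k=1):
--     # Keep x at position i iff fewer than k copies of x occur before i.
--     return [x for i, x in enumerate(items) if items[:i].count(x) < k]
-- ===== Notes on version B (the rewrite author's own statement) =====
-- stated objective: simpler
-- what changed: A maintains a distinct-element list plus a parallel mutable counter array and appends while streaming; B is a stateless one-line comprehension that keeps element i iff its count in the preceding prefix items[:i] is below k.
import Mathlib
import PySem

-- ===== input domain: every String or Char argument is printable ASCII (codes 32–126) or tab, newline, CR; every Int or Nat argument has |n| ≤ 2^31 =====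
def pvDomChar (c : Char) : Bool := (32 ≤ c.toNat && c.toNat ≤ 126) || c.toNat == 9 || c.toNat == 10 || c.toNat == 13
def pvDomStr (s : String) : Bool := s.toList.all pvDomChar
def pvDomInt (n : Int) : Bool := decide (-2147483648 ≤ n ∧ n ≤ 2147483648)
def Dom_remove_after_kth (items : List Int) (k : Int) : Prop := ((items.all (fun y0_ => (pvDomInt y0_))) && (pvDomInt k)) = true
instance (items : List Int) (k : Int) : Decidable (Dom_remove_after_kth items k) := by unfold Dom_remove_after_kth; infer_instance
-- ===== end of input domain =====

-- B replaces A's distinct-list + parallel counter array + streaming append with a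
-- stateless comprehension keeping element i iff its count in the prefix items[:i] is < k (objective: simpler).

-- ===== PORT A =====
-- same_items = list(set(items)): Python's set order is arbitrary; the result only reads counts per
-- element, so it does not depend on that order — ported with PySem.Set's first-insertion order.
def remove_after_kth (items : List Int) (k : Int) : List Int :=
  let finalized_items : List Int := []
  let same_items : List Int := PySem.Set.ofList items
  let number_of_items : List Int := List.replicate same_items.length 0
  let st := (PySem.List.pyRange 0 (PySem.List.len items)).foldl
    (fun (st : List Int × List Int) i =>
      -- index = same_items.index(items[i]); items[i] is always a member, so .index never raises
      let index := (PySem.List.index? same_items (PySem.List.pyGetD items i 0)).getD 0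
      -- number_of_items[index] = number_of_items[index] + 1
      let cnts := st.1.set index (PySem.List.pyGetD st.1 (index : Int) 0 + 1)
      if PySem.List.pyGetD cnts (index : Int) 0 ≤ k then
        (cnts, st.2 ++ [PySem.List.pyGetD items i 0])
      else (cnts, st.2))
    (number_of_items, finalized_items)
  st.2

-- ===== PORT B =====
def remove_after_kth_alt (items : List Int) (k : Int) : List Int :=
  ((PySem.List.enumerate items 0).filter
    (fun p => decide ((PySem.List.count (PySem.List.slice items none (some p.1)) p.2 : Int) < k))).map (·.2)

-- ===== PRECONDITION & SPEC =====
def Spec_remove_after_kth (items : List Int) (k : Int) (out : List Int) : Prop := out = remove_after_kth_alt items k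
instance (items : List Int) (k : Int) (out : List Int) : Decidable (Spec_remove_after_kth items k out) := by unfold Spec_remove_after_kth; infer_instance

-- ===== CLAIM (what is proved, stated in full; the proofs are below) =====
def Claim_equal_remove_after_kth : Prop := ∀ (items : List Int) (k : Int), Dom_remove_after_kth items k → Spec_remove_after_kth items k (remove_after_kth items k)

-- ===== LEMMAS AND PROOFS =====

-- Reference recursion: keep x when its count in the already-seen prefix `pre` is < k.
def ramGo (k : Int) (pre : List Int) : List Int → List Int
  | [] => []
  | x :: xs => (if (List.count x pre : Int) < k then [x] else []) ++ ramGo k (pre ++ [x]) xs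

-- B equals the reference recursion.
theorem alt_go (k : Int) : ∀ (xs pre full : List Int), full = pre ++ xs →
    ((PySem.List.enumerate xs (pre.length : Int)).filter
      (fun p => decide ((PySem.List.count (PySem.List.slice full none (some p.1)) p.2 : Int) < k))).map (·.2)
    = ramGo k pre xs := by
  intro xs
  induction xs with
  | nil => intro pre full _; simp [PySem.List.enumerate_nil, ramGo]
  | cons x xs ih =>
    intro pre full hfull
    rw [PySem.List.enumerate_cons, List.filter_cons]
    have hsl : PySem.List.slice full none (some (pre.length : Int)) = pre := by
      rw [PySem.List.slice_to full (by positivity)]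
      simp [hfull]
    have hrec : ((PySem.List.enumerate xs ((pre.length : Int) + 1)).filter
        (fun p => decide ((PySem.List.count (PySem.List.slice full none (some p.1)) p.2 : Int) < k))).map (·.2)
        = ramGo k (pre ++ [x]) xs := by
      have := ih (pre ++ [x]) full (by simp [hfull])
      simpa [List.length_append] using this
    simp only [hsl, PySem.List.count_eq, ramGo]
    simp only [PySem.List.count_eq] at hrec
    by_cases h : (List.count x pre : Int) < k
    · simpa [h] using hrec
    · simpa [h] using hrec

-- A's loop body after the range→list rewrite.
def ramStep (same : List Int) (k : Int) (st : List Int × List Int) (x : Int) : List Int × List Int :=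
  let index := (PySem.List.index? same x).getD 0
  let cnts := st.1.set index (PySem.List.pyGetD st.1 (index : Int) 0 + 1)
  if PySem.List.pyGetD cnts (index : Int) 0 ≤ k then (cnts, st.2 ++ [x]) else (cnts, st.2)

-- counter array update = counts of the extended prefix
theorem counts_step (same : List Int) (hnd : same.Nodup) (pre : List Int) (x : Int) (j : Nat)
    (hj : PySem.List.index? same x = some j) :
    (same.map (fun y => (List.count y pre : Int))).set j
      (PySem.List.pyGetD (same.map (fun y => (List.count y pre : Int))) (j : Int) 0 + 1)
    = same.map (fun y => (List.count y (pre ++ [x]) : Int)) := by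
  obtain ⟨hk, hxv, -⟩ := PySem.List.getElem_of_index?_eq_some hj
  rw [PySem.List.pyGetD_natCast]
  apply List.ext_getElem
  · simp
  · intro i h1 h2
    rw [List.getElem_set]
    by_cases hij : j = i
    · subst hij
      simp only [List.getElem_map, List.getD_eq_getElem?_getD, List.getElem?_map]
      simp [List.getElem?_eq_getElem hk, List.count_append, hxv]
    · have hil : i < same.length := by simpa using h2
      have hne : same[i] ≠ x := by
        intro he
        exact hij (by
          have := List.Nodup.getElem_inj_iff hnd (i := j) (j := i) (hi := hk) (hj := hil)
          exact this.mp (by rw [hxv, he]))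
      simp only [if_neg hij, List.getElem_map]
      rw [List.count_append]
      simp [Ne.symm hne]

theorem a_go (same : List Int) (hnd : same.Nodup) (k : Int) :
    ∀ (xs pre acc : List Int), (∀ y ∈ xs, y ∈ same) →
    xs.foldl (ramStep same k) (same.map (fun y => (List.count y pre : Int)), acc)
    = (same.map (fun y => (List.count y (pre ++ xs) : Int)), acc ++ ramGo k pre xs) := by
  intro xs
  induction xs with
  | nil => intro pre acc _; simp [ramGo]
  | cons x xs ih =>
    intro pre acc hmem
    have hx : x ∈ same := hmem x (by simp)
    obtain ⟨j, hj⟩ := Option.isSome_iff_exists.mp ((PySem.List.index?_isSome_iff same x).mpr hx)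
    obtain ⟨hk, hxv, -⟩ := PySem.List.getElem_of_index?_eq_some hj
    rw [List.foldl_cons]
    have hstep : ramStep same k (same.map (fun y => (List.count y pre : Int)), acc) x
        = (same.map (fun y => (List.count y (pre ++ [x]) : Int)),
           if (List.count x pre : Int) < k then acc ++ [x] else acc) := by
      unfold ramStep
      simp only [hj, Option.getD_some]
      rw [counts_step same hnd pre x j hj]
      have hget : PySem.List.pyGetD (same.map (fun y => (List.count y (pre ++ [x]) : Int))) (j : Int) 0
          = (List.count x pre : Int) + 1 := by
        rw [PySem.List.pyGetD_natCast]
        simp [List.getD_eq_getElem?_getD, List.getElem?_eq_getElem hk,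
          List.getElem?_map, hxv, List.count_append]
      rw [hget]
      by_cases h : (List.count x pre : Int) < k
      · rw [if_pos (by omega), if_pos h]
      · rw [if_neg (by omega), if_neg h]
    rw [hstep]
    by_cases h : (List.count x pre : Int) < k
    · rw [if_pos h, ih (pre ++ [x]) (acc ++ [x]) (fun y hy => hmem y (by simp [hy]))]
      simp [ramGo, h]
    · rw [if_neg h, ih (pre ++ [x]) acc (fun y hy => hmem y (by simp [hy]))]
      simp [ramGo, h]

theorem a_eq_go (items : List Int) (k : Int) :
    remove_after_kth items k = ramGo k [] items := by
  show (List.foldl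
      (fun (st : List Int × List Int) (i : Int) =>
        ramStep (PySem.Set.ofList items) k st (PySem.List.pyGetD items i 0))
      (List.replicate (PySem.Set.ofList items : List Int).length 0, ([] : List Int))
      (PySem.List.pyRange 0 (PySem.List.len items))).2 = ramGo k [] items
  rw [PySem.List.foldl_pyRange_zero_pyGetD items 0 (ramStep (PySem.Set.ofList items) k)]
  have hinit : (List.replicate (PySem.Set.ofList items : List Int).length (0 : Int))
      = (PySem.Set.ofList items : List Int).map (fun y => (List.count y ([] : List Int) : Int)) := by
    simp [List.map_const']
  rw [hinit,
    a_go (PySem.Set.ofList items) (PySem.Set.nodup_ofList items) k items [] []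
      (fun y hy => (PySem.Set.mem_ofList items y).mpr hy)]
  simp

theorem b_eq_go (items : List Int) (k : Int) :
    remove_after_kth_alt items k = ramGo k [] items := by
  unfold remove_after_kth_alt
  have := alt_go k items [] items rfl
  simpa using this

-- ===== VERDICT (by name: the statement is the Claim_ definition above) =====
theorem remove_after_kth_spec : Claim_equal_remove_after_kth := by
  intro items k _
  unfold Spec_remove_after_kth
  rw [a_eq_go, b_eq_go]
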